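-- pv_equiv track=rewrite | github.com/Codechef-SRM-NCR-Chapter/30-DaysOfCode-March-2021 | answers/Drish-xD/Day-12/Question-2.py | count
-- ===== SOURCE A (Python) =====
-- def count(strr):
--     x = 0
--     l = len(strr)
--     for i in range(l):
--         if strr[i] == '1':
--             for j in range(i, l):
--                 if strr[j] == '1':
--                     x += 1
--     return x
-- ===== SOURCE B (Python) =====
-- def count(strr):
--     # closed form: with k ones, the ordered pairs i <= j of '1' positions number k*(k+1)//2
--     k = strr.count('1')
--     return k * (k + 1) // 2
-- ===== Notes on version B (the rewrite author's own statement) =====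
-- stated objective: faster
-- what changed: replaces the quadratic double index loop by counting the ones once and returning the closed form k*(k+1)//2
import Mathlib
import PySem

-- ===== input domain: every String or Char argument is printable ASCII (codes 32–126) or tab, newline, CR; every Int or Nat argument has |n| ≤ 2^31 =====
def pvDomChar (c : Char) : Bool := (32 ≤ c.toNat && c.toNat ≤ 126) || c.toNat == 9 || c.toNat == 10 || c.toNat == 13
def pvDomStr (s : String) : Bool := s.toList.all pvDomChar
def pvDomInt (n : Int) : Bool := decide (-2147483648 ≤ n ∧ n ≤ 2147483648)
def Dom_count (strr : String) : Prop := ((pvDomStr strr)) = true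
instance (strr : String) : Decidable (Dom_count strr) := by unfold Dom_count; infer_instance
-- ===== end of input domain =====

-- B replaces A's quadratic double index loop by the closed form k*(k+1)//2 over the number k of '1's (asymptotically faster).

-- ===== PORT A =====
-- literal transliteration of A's nested index loops (strr[i] read with pyGetD; indices stay in range)
def count (strr : String) : Int :=
  let cs := strr.toList
  let l : Int := PySem.Str.len strr
  (PySem.List.pyRange 0 l 1).foldl (fun x i =>
    if PySem.List.pyGetD cs i ' ' == '1' then
      (PySem.List.pyRange i l 1).foldl (fun x j =>
        if PySem.List.pyGetD cs j ' ' == '1' then x + 1 else x) x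
    else x) 0

-- ===== PORT B =====
def count_alt (strr : String) : Int :=
  let k : Int := (PySem.Str.count strr "1" : Int)
  PySem.Int.floordiv (k * (k + 1)) 2

-- ===== PRECONDITION & SPEC =====
def Spec_count (strr : String) (out : Int) : Prop := out = count_alt strr
instance (strr : String) (out : Int) : Decidable (Spec_count strr out) := by unfold Spec_count; infer_instance

-- ===== CLAIM (what is proved, stated in full; the proofs are below) =====
def Claim_equal_count : Prop := ∀ (strr : String), Dom_count strr → Spec_count strr (count strr)

-- ===== LEMMAS AND PROOFS =====

-- Python str.count with a single-character needle is List.count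
theorem chars_count_go_singleton (c : Char) (fuel : Nat) (l : List Char) (acc : Nat)
    (h : l.length ≤ fuel) : PySem.Chars.count.go [c] fuel l acc = acc + l.count c := by
  induction fuel generalizing l acc with
  | zero =>
    have : l = [] := by cases l <;> simp_all
    subst this; simp [PySem.Chars.count.go]
  | succ n ih =>
    cases l with
    | nil => simp [PySem.Chars.count.go]
    | cons hd t =>
      simp only [PySem.Chars.count.go]
      by_cases hc : c = hd
      · subst hc
        have hp : List.isPrefixOf [c] (c :: t) = true := by simp [List.isPrefixOf]
        rw [if_pos hp]
        simp only [List.length_singleton, List.drop_one, List.tail_cons]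
        rw [ih t (acc + 1) (by simpa using Nat.le_of_succ_le_succ (by simpa using h))]
        simp
        omega
      · have hp : List.isPrefixOf [c] (hd :: t) = false := by
          simp [List.isPrefixOf, hc]
        rw [if_neg (by simp [hp])]
        rw [ih t acc (by simpa using Nat.le_of_succ_le_succ (by simpa using h))]
        simp only [List.count_cons]
        have : ¬ hd = c := fun e => hc e.symm
        simp [this]

theorem chars_count_singleton (cs : List Char) (c : Char) :
    PySem.Chars.count cs [c] = cs.count c := by
  unfold PySem.Chars.count
  simp only [List.isEmpty_cons, Bool.false_eq_true, if_false]
  simpa using chars_count_go_singleton c cs.length cs 0 le_rfl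

-- the Int-valued count of '1's in cs
def pvOnes (cs : List Char) : Int := (cs.count '1' : Int)

-- A's value as a sum over suffix-one-counts, structural form
def pvSum (cs : List Char) : Int :=
  ((List.range cs.length).map (fun i =>
    if cs.getD i ' ' == '1' then pvOnes (cs.drop i) else 0)).sum

-- the inner loop of A is the one-count of the suffix
theorem inner_loop_eq (cs : List Char) (i : Int) (hi : 0 ≤ i) (x : Int) :
    (PySem.List.pyRange i (PySem.List.len cs) 1).foldl (fun x j =>
        if PySem.List.pyGetD cs j ' ' == '1' then x + 1 else x) x
      = x + pvOnes (cs.drop i.toNat) := by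
  rw [PySem.List.foldl_pyRange_pyGetD cs ' ' (fun x c => if c == '1' then x + 1 else x) x hi]
  rw [PySem.List.foldl_beq_add_one]
  rfl

-- the outer fold of A equals pvSum
theorem count_eq_pvSum (cs : List Char) :
    (PySem.List.pyRange 0 (PySem.List.len cs) 1).foldl (fun x i =>
      if PySem.List.pyGetD cs i ' ' == '1' then
        (PySem.List.pyRange i (PySem.List.len cs) 1).foldl (fun x j =>
          if PySem.List.pyGetD cs j ' ' == '1' then x + 1 else x) x
      else x) 0 = pvSum cs := by
  rw [PySem.List.foldl_congr_mem _ _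
      (fun x i => x + (if PySem.List.pyGetD cs i ' ' == '1' then pvOnes (cs.drop i.toNat) else 0)) 0
      (by
        intro x i hi
        rw [PySem.List.mem_pyRange_one] at hi
        by_cases h : (PySem.List.pyGetD cs i ' ' == '1') = true
        · simp only [h, if_true]
          exact inner_loop_eq cs i hi.1 x
        · rw [Bool.not_eq_true] at h
          simp [h])]
  rw [PySem.List.foldl_add]
  simp only [PySem.List.pyRange_one, PySem.List.len_eq, List.map_map, zero_add]
  unfold pvSum
  congr 1
  apply List.map_congr_left
  intro k hk
  simp [PySem.List.pyGetD_natCast]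

-- pvSum peels off the head position
theorem pvSum_cons (c : Char) (t : List Char) :
    pvSum (c :: t) = (if c == '1' then pvOnes (c :: t) else 0) + pvSum t := by
  simp [pvSum, List.range_succ_eq_map, List.map_map, Function.comp_def]

-- the quantitative heart: twice the sum is k*(k+1)
theorem two_mul_pvSum (cs : List Char) : 2 * pvSum cs = pvOnes cs * (pvOnes cs + 1) := by
  induction cs with
  | nil => simp [pvSum, pvOnes]
  | cons c t ih =>
    rw [pvSum_cons]
    by_cases h : c = '1'
    · subst h
      have hk : pvOnes ('1' :: t) = pvOnes t + 1 := by simp [pvOnes]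
      rw [if_pos (by simp), hk]
      ring_nf
      ring_nf at ih
      omega
    · have hk : pvOnes (c :: t) = pvOnes t := by simp [pvOnes, h]
      rw [if_neg (by simpa using h), hk]
      omega

theorem count_spec : Claim_equal_count := by
  intro strr _
  unfold Spec_count count count_alt
  simp only []
  rw [PySem.Str.len_eq]
  have h1 : (PySem.Str.count strr "1" : Int) = pvOnes strr.toList := by
    rw [PySem.Str.count_eq]
    have : "1".toList = ['1'] := rfl
    rw [this, chars_count_singleton]
    rfl
  have h2 := count_eq_pvSum strr.toList
  rw [PySem.List.len_eq] at h2
  rw [h2, h1]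
  have h3 := two_mul_pvSum strr.toList
  rw [eq_comm, PySem.Int.floordiv_eq_iff_of_pos (by norm_num)]
  omega
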